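-- pv_equiv track=rewrite | github.com/thomas302/aoc_2024 | d6/d6_p2_t.py | traverse_direction
-- ===== SOURCE A (Python) =====
-- def traverse_direction(_map, start, direction):
--     pos = start
--     while True:
--         if pos[0] < len(_map) and pos[1] < len(_map[0]) and pos[0] >= 0 and pos[1] >= 0:
--             current_val = _map[pos[0]][pos[1]]
--             if current_val == '#':
--                 return [pos[0]-direction[0], pos[1]-direction[1]], [direction[1], -direction[0]], True, _map
--             else:
--                 s = _map[pos[0]]
--                 _map[pos[0]] = s[:pos[1]] + 'X' + s[pos[1] + 1:]
--
--         else: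
--             return [pos[0], pos[1]], direction, False, _map
--
--         pos[0] += direction[0]
--         pos[1] += direction[1]
-- ===== SOURCE B (Python) =====
-- def traverse_direction(_map, start, direction):
--     # Batch version: compute the stopping step arithmetically, scan once for a
--     # wall, then mark the visited cells grouped by row (one rebuild per row).
--     # Note: like the original, this mutates _map's rows in place (same final
--     # contents); unlike the original it does not mutate `start`.
--     s0, s1 = start[0], start[1]
--     d0, d1 = direction[0], direction[1]
--     H = len(_map)
--     W = len(_map[0]) if _map else 0
--     if not (0 <= s0 < H and 0 <= s1 < W):
--         return [s0, s1], direction, False, _map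
--     # kmax = largest k >= 0 with s + k*d still inside the grid
--     if d0 == 0 and d1 == 0:
--         kmax = 0
--     else:
--         lims = []
--         if d0 > 0:
--             lims.append((H - 1 - s0) // d0)
--         if d0 < 0:
--             lims.append(s0 // -d0)
--         if d1 > 0:
--             lims.append((W - 1 - s1) // d1)
--         if d1 < 0:
--             lims.append(s1 // -d1)
--         kmax = min(lims)
--     hit = next((k for k in range(kmax + 1)
--                 if _map[s0 + k * d0][s1 + k * d1] == '#'), None)
--     n = hit if hit is not None else kmax + 1   # cells 0..n-1 get marked
--     if n > 0:
--         if d0 == 0: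
--             js = {s1 + k * d1 for k in range(n)}
--             row = _map[s0]
--             _map[s0] = ''.join('X' if j in js else c for j, c in enumerate(row))
--         else:
--             for k in range(n):
--                 i, j = s0 + k * d0, s1 + k * d1
--                 row = _map[i]
--                 _map[i] = row[:j] + 'X' + row[j + 1:]
--     if hit is not None:
--         return [s0 + (hit - 1) * d0, s1 + (hit - 1) * d1], [d1, -d0], True, _map
--     return [s0 + n * d0, s1 + n * d1], direction, False, _map
-- ===== Notes on version B (the rewrite author's own statement) =====
-- stated objective: alternative
-- what changed: B replaces the step-by-step walk (bounds check + row-string rebuild at every step) by computing the last in-bounds step arithmetically, scanning once for the first wall, and then marking the visited cells grouped by row (a horizontal walk rebuilds its row once).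
-- outside the precondition, e.g. on traverse_direction(['.'], [5, 0], []): A returns ([5, 0], [], False, ['.']), B raises IndexError
import Mathlib
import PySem

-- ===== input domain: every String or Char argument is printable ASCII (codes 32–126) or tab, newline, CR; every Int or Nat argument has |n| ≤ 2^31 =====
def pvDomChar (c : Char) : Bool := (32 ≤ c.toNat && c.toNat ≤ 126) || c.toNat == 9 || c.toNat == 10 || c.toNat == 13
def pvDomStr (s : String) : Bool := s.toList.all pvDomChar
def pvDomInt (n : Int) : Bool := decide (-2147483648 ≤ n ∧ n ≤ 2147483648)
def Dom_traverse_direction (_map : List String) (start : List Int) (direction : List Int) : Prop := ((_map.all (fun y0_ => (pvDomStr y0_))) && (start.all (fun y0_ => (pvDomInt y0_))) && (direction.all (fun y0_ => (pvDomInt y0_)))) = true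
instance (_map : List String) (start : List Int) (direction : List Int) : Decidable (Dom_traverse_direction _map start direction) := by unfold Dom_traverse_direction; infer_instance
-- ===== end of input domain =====

-- B re-implements the straight-line walk by computing the stopping step arithmetically and
-- marking the visited cells grouped by row (one row rebuild for a horizontal walk) instead of
-- rebuilding a row string at every step. Equivalence is about the RETURN value: A also
-- mutates `start` in place (B does not); both leave `_map`'s rows with the same contents.

def pvCell (m : List String) (i j : Int) : Char :=
  (PySem.Str.pyGet? (PySem.List.pyGetD m i "") j).getD ' '
def pvMark (s : List Char) (j : Int) : List Char :=
  PySem.Chars.slice s none (some j) ++ ['X'] ++ PySem.Chars.slice s (some (j + 1)) none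
def pvUpd (m : List String) (i j : Int) : List String :=
  PySem.List.pySetD m i (String.ofList (pvMark (PySem.List.pyGetD m i "").toList j))

-- ===== PORT A =====
-- the while-True loop; fuel = H + W + 1 bounds the iteration count on every input Pre_
-- admits (on the excluded diverging inputs the fuel-0 branch returns a dummy value)
def pvGoA (m : List String) (direction : List Int) (d0 d1 i j : Int) : Nat → List Int × List Int × Bool × List String
  | 0 => ([i, j], direction, false, m)
  | fuel + 1 =>
    if i < (m.length : Int) ∧ j < ((m.headD "").length : Int) ∧ 0 ≤ i ∧ 0 ≤ j then
      if pvCell m i j = '#' then ([i - d0, j - d1], [d1, -d0], true, m)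
      else pvGoA (pvUpd m i j) direction d0 d1 (i + d0) (j + d1) fuel
    else ([i, j], direction, false, m)
def traverse_direction (_map : List String) (start : List Int) (direction : List Int) : List Int × List Int × Bool × List String :=
  pvGoA _map direction (PySem.List.pyGetD direction 0 0) (PySem.List.pyGetD direction 1 0)
    (PySem.List.pyGetD start 0 0) (PySem.List.pyGetD start 1 0)
    (_map.length + (_map.headD "").length + 1)

-- ===== PORT B =====
-- kmax = min(lims): the largest k >= 0 with start + k*direction still inside the grid
def pvKmax (H W s0 s1 d0 d1 : Int) : Int :=
  if d0 = 0 ∧ d1 = 0 then 0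
  else
    let lims : List Int :=
      (if d0 > 0 then [PySem.Int.floordiv (H - 1 - s0) d0] else []) ++
      (if d0 < 0 then [PySem.Int.floordiv s0 (-d0)] else []) ++
      (if d1 > 0 then [PySem.Int.floordiv (W - 1 - s1) d1] else []) ++
      (if d1 < 0 then [PySem.Int.floordiv s1 (-d1)] else [])
    (PySem.List.min? lims (fun x => x)).getD 0
def traverse_direction_alt (_map : List String) (start : List Int) (direction : List Int) : List Int × List Int × Bool × List String :=
  let s0 := PySem.List.pyGetD start 0 0
  let s1 := PySem.List.pyGetD start 1 0
  let d0 := PySem.List.pyGetD direction 0 0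
  let d1 := PySem.List.pyGetD direction 1 0
  let H : Int := _map.length
  let W : Int := (_map.headD "").length
  if ¬(0 ≤ s0 ∧ s0 < H ∧ 0 ≤ s1 ∧ s1 < W) then ([s0, s1], direction, false, _map)
  else
    let kmax := pvKmax H W s0 s1 d0 d1
    let hit : Option Int := (PySem.List.pyRange 0 (kmax + 1) 1).find?
      (fun k => decide (pvCell _map (s0 + k * d0) (s1 + k * d1) = '#'))
    let n : Int := match hit with | some k => k | none => kmax + 1
    let m' : List String :=
      if 0 < n then
        if d0 = 0 then
          let js : PySem.Set Int := PySem.Set.ofList ((PySem.List.pyRange 0 n 1).map (fun k => s1 + k * d1))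
          let row := PySem.List.pyGetD _map s0 ""
          PySem.List.pySetD _map s0 (String.ofList
            ((PySem.List.enumerate row.toList 0).map (fun p => if js.contains p.1 then 'X' else p.2)))
        else
          (PySem.List.pyRange 0 n 1).foldl (fun mm k => pvUpd mm (s0 + k * d0) (s1 + k * d1)) _map
      else _map
    match hit with
    | some k => ([s0 + (k - 1) * d0, s1 + (k - 1) * d1], [d1, -d0], true, m')
    | none => ([s0 + n * d0, s1 + n * d1], direction, false, m')

-- ===== PRECONDITION & SPEC =====
-- Pre_ excludes: start/direction shorter than 2 (IndexError), an empty map with a negative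
-- start row (IndexError in the bounds test), a zero direction on an in-bounds non-'#' cell
-- (A loops forever), and — slightly narrower than strictly necessary — maps with a row
-- shorter than row 0 when the start is in bounds (the walk can hit such a row: IndexError).
def Pre_traverse_direction (_map : List String) (start : List Int) (direction : List Int) : Prop :=
  2 ≤ start.length ∧ 2 ≤ direction.length ∧
  (_map = [] → 0 ≤ start.getD 0 0) ∧
  ((0 ≤ start.getD 0 0 ∧ start.getD 0 0 < (_map.length : Int) ∧
    0 ≤ start.getD 1 0 ∧ start.getD 1 0 < ((_map.headD "").length : Int)) →
    ((∀ r ∈ _map, (_map.headD "").length ≤ r.length) ∧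
     ¬(direction.getD 0 0 = 0 ∧ direction.getD 1 0 = 0 ∧
       pvCell _map (start.getD 0 0) (start.getD 1 0) ≠ '#')))
instance (_map : List String) (start : List Int) (direction : List Int) : Decidable (Pre_traverse_direction _map start direction) := by unfold Pre_traverse_direction; infer_instance

def pvWitness_traverse_direction : List String × List Int × List Int := (["....#", ".....?"], [1, 0], [0, 1])

def Spec_traverse_direction (_map : List String) (start : List Int) (direction : List Int) (out : List Int × List Int × Bool × List String) : Prop := out = traverse_direction_alt _map start direction
instance (_map : List String) (start : List Int) (direction : List Int) (out : List Int × List Int × Bool × List String) : Decidable (Spec_traverse_direction _map start direction out) := by unfold Spec_traverse_direction; infer_instance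

-- ===== CLAIM (what is proved, stated in full; the proofs are below) =====
def Claim_equal_traverse_direction : Prop := ∀ (_map : List String) (start : List Int) (direction : List Int), Dom_traverse_direction _map start direction → Pre_traverse_direction _map start direction → Spec_traverse_direction _map start direction (traverse_direction _map start direction)

-- ===== LEMMAS AND PROOFS =====

theorem pvMark_set {cs : List Char} {j : Int} (h0 : 0 ≤ j) (h1 : j < cs.length) :
    pvMark cs j = cs.set j.toNat 'X' := by
  have hs1 : PySem.Chars.slice cs none (some j) = List.take j.toNat cs :=
    PySem.List.slice_to cs h0
  have hs2 : PySem.Chars.slice cs (some (j + 1)) none = List.drop (j + 1).toNat cs :=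
    PySem.List.slice_from cs (by omega)
  rw [pvMark, hs1, hs2, List.set_eq_take_append_cons_drop, if_pos (by omega)]
  have : (j + 1).toNat = j.toNat + 1 := by omega
  simp [this]
theorem pvUpd_row (m : List String) {i : Int} (j : Int) (hi0 : 0 ≤ i) (hi1 : i < (m.length : Int)) :
    pvUpd m i j = m.set i.toNat (String.ofList (pvMark (m[i.toNat]'(by omega)).toList j)) := by
  rw [pvUpd, PySem.List.pySetD_of_nonneg _ _ hi0,
    PySem.List.pyGetD_eq_getElem _ _ hi0 hi1]
theorem pv_pyGetD_oob {α : Type} (xs : List α) {i : Int} (d : α) (h : (xs.length : Int) ≤ i) :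
    PySem.List.pyGetD xs i d = d := by
  have : PySem.List.pyGet? xs i = none := by
    rw [PySem.List.pyGet?_eq_none_iff]
    simp [PySem.Raise.InRange]; omega
  simp [PySem.List.pyGetD, this]

theorem pv_cell_set (s : String) (j j' : Int) (hj : 0 ≤ j ∧ j < (s.toList.length : Int)) (hj' : 0 ≤ j') :
    (PySem.Str.pyGet? (String.ofList (s.toList.set j.toNat 'X')) j').getD ' ' =
      if j' = j then 'X' else (PySem.Str.pyGet? s j').getD ' ' := by
  have h1 : ∀ (t : String) (k : Int), PySem.Str.pyGet? t k = PySem.List.pyGet? t.toList k := by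
    intro t k; simp [PySem.Str.pyGet?]
  rw [h1, h1]
  have h2 : (String.ofList (s.toList.set j.toNat 'X')).toList = s.toList.set j.toNat 'X' := by simp
  rw [h2, PySem.List.pyGet?_of_nonneg _ hj', PySem.List.pyGet?_of_nonneg _ hj']
  rw [List.getElem?_set]
  by_cases hje : j' = j
  · subst hje
    rw [if_pos rfl, if_pos (by omega), if_pos rfl]
    rfl
  · rw [if_neg (by omega : ¬ j.toNat = j'.toNat), if_neg hje]

theorem pvUpd_length (m : List String) (i j : Int) : (pvUpd m i j).length = m.length := by
  simp [pvUpd, PySem.List.length_pySetD]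

theorem pvCell_pvUpd (m : List String) {i j : Int} (i' j' : Int)
    (hi : 0 ≤ i ∧ i < (m.length : Int)) (hj : 0 ≤ j ∧ j < ((m[i.toNat]'(by omega)).toList.length : Int))
    (hi' : 0 ≤ i') (hj' : 0 ≤ j') :
    pvCell (pvUpd m i j) i' j' = if i' = i ∧ j' = j then 'X' else pvCell m i' j' := by
  rw [pvUpd_row m j hi.1 hi.2]
  by_cases hlt : i' < (m.length : Int)
  · rw [pvCell, PySem.List.pyGetD_eq_getElem _ _ hi' (by simpa using hlt),
        pvCell, PySem.List.pyGetD_eq_getElem _ _ hi' hlt]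
    rw [List.getElem_set]
    by_cases hii : i.toNat = i'.toNat
    · have hieq : i' = i := by omega
      rw [if_pos hii, pvMark_set hj.1 hj.2]
      have hrow : m[i'.toNat]'(by omega) = m[i.toNat]'(by omega) := by congr 1; omega
      rw [hrow, pv_cell_set _ _ _ hj hj']
      by_cases hjj : j' = j
      · rw [if_pos hjj, if_pos ⟨hieq, hjj⟩]
      · rw [if_neg hjj, if_neg (by tauto)]
    · have hine : ¬(i' = i ∧ j' = j) := by
        intro hc; exact hii (by omega)
      rw [if_neg hii, if_neg hine]
  · have hine : ¬(i' = i ∧ j' = j) := by intro hc; omega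
    rw [if_neg hine, pvCell, pvCell, pv_pyGetD_oob _ _ (by simpa using (by omega : (m.length:Int) ≤ i')),
        pv_pyGetD_oob _ _ (by omega)]

theorem pvUpd_rowlen (m : List String) {i j : Int} (a : Nat) (ha : a < m.length)
    (hi : 0 ≤ i ∧ i < (m.length : Int)) (hj : 0 ≤ j ∧ j < ((m[i.toNat]'(by omega)).toList.length : Int)) :
    (((pvUpd m i j)[a]'(by rw [pvUpd_length]; exact ha)).toList.length) = ((m[a]).toList.length) := by
  simp only [pvUpd_row m j hi.1 hi.2]
  rw [List.getElem_set]
  by_cases hii : i.toNat = a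
  · rw [if_pos hii, pvMark_set hj.1 hj.2]
    subst hii
    simp
  · rw [if_neg hii]

def pvM (m : List String) (s0 s1 d0 d1 : Int) (t : Nat) : List String :=
  (List.range t).foldl (fun mm (u : Nat) => pvUpd mm (s0 + (u : Int) * d0) (s1 + (u : Int) * d1)) m

theorem pvM_succ (m : List String) (s0 s1 d0 d1 : Int) (t : Nat) :
    pvM m s0 s1 d0 d1 (t + 1) = pvUpd (pvM m s0 s1 d0 d1 t) (s0 + (t : Int) * d0) (s1 + (t : Int) * d1) := by
  simp [pvM, List.range_succ]

theorem pvM_spec (m : List String) (s0 s1 d0 d1 : Int) (t : Nat)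
    (hrow : ∀ r ∈ m, (m.headD "").length ≤ r.length)
    (hin : ∀ u : Nat, u < t → 0 ≤ s0 + (u : Int) * d0 ∧ s0 + (u : Int) * d0 < (m.length : Int) ∧
           0 ≤ s1 + (u : Int) * d1 ∧ s1 + (u : Int) * d1 < ((m.headD "").length : Int)) :
    (pvM m s0 s1 d0 d1 t).length = m.length ∧
    (∀ a : Nat, (((pvM m s0 s1 d0 d1 t).getD a "").toList.length) = ((m.getD a "").toList.length)) ∧
    (∀ i' j' : Int, 0 ≤ i' → 0 ≤ j' →
      pvCell (pvM m s0 s1 d0 d1 t) i' j' =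
        if ∃ u : Nat, u < t ∧ s0 + (u : Int) * d0 = i' ∧ s1 + (u : Int) * d1 = j' then 'X'
        else pvCell m i' j') := by
  induction t with
  | zero =>
    refine ⟨rfl, fun a => rfl, fun i' j' _ _ => ?_⟩
    rw [if_neg (by rintro ⟨u, hu, -⟩; omega)]
    rfl
  | succ t ih =>
    obtain ⟨ihlen, ihrow, ihcell⟩ := ih (fun u hu => hin u (by omega))
    have hint := hin t (by omega)
    set it := s0 + (t : Int) * d0 with hit
    set jt := s1 + (t : Int) * d1 with hjt
    have hibd : 0 ≤ it ∧ it < ((pvM m s0 s1 d0 d1 t).length : Int) := by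
      rw [ihlen]; exact ⟨hint.1, hint.2.1⟩
    have hitnat : it.toNat < m.length := by omega
    have hmemrow : m[it.toNat] ∈ m := List.getElem_mem _
    have hWle : ((m.headD "").length : Int) ≤ ((m[it.toNat]).toList.length : Int) := by
      have h0 := hrow _ hmemrow
      have h1 : (m[it.toNat]'hitnat).toList.length = (m[it.toNat]'hitnat).length := by simp
      omega
    have hjbd : 0 ≤ jt ∧ jt < ((((pvM m s0 s1 d0 d1 t)[it.toNat]'(by omega)).toList.length) : Int) := by
      refine ⟨hint.2.2.1, ?_⟩
      have hg : (pvM m s0 s1 d0 d1 t)[it.toNat]'(by omega) = (pvM m s0 s1 d0 d1 t).getD it.toNat "" := by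
        rw [List.getD_eq_getElem?_getD, List.getElem?_eq_getElem (by omega)]; rfl
      have hg2 : m[it.toNat]'hitnat = m.getD it.toNat "" := by
        rw [List.getD_eq_getElem?_getD, List.getElem?_eq_getElem hitnat]; rfl
      rw [hg, ihrow it.toNat]
      rw [hg2] at hWle
      omega
    refine ⟨?_, ?_, ?_⟩
    · rw [pvM_succ, pvUpd_length, ihlen]
    · intro a
      rw [pvM_succ]
      by_cases halt : a < m.length
      · have h1 : (pvUpd (pvM m s0 s1 d0 d1 t) it jt).getD a "" =
            (pvUpd (pvM m s0 s1 d0 d1 t) it jt)[a]'(by rw [pvUpd_length]; omega) := by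
          rw [List.getD_eq_getElem?_getD, List.getElem?_eq_getElem (by rw [pvUpd_length]; omega)]; rfl
        rw [h1, pvUpd_rowlen _ a (by omega) hibd hjbd]
        have h2 : (pvM m s0 s1 d0 d1 t)[a]'(by omega) = (pvM m s0 s1 d0 d1 t).getD a "" := by
          rw [List.getD_eq_getElem?_getD, List.getElem?_eq_getElem (by omega)]; rfl
        rw [h2]
        exact ihrow a
      · rw [List.getD_eq_default _ _ (by rw [pvUpd_length]; omega),
            List.getD_eq_default _ _ (by omega)]
    · intro i' j' hi' hj'
      rw [pvM_succ, pvCell_pvUpd _ i' j' hibd hjbd hi' hj', ihcell i' j' hi' hj']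
      by_cases hc : i' = it ∧ j' = jt
      · rw [if_pos hc, if_pos ⟨t, by omega, by omega, by omega⟩]
      · rw [if_neg hc]
        by_cases hex : ∃ u : Nat, u < t ∧ s0 + (u : Int) * d0 = i' ∧ s1 + (u : Int) * d1 = j'
        · rw [if_pos hex, if_pos (by obtain ⟨u, hu, h1, h2⟩ := hex; exact ⟨u, by omega, h1, h2⟩)]
        · rw [if_neg hex, if_neg ?_]
          rintro ⟨u, hu, h1, h2⟩
          rcases Nat.lt_succ_iff_lt_or_eq.mp hu with h | h
          · exact hex ⟨u, h, h1, h2⟩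
          · subst h; exact hc ⟨h1.symm, h2.symm⟩
theorem pvRun (m : List String) (direction : List Int) (s0 s1 d0 d1 kmax : Int) (N : Nat) (hitb : Bool)
    (hrow : ∀ r ∈ m, (m.headD "").length ≤ r.length)
    (hkiff : ∀ k : Int, 0 ≤ k → ((0 ≤ s0 + k * d0 ∧ s0 + k * d0 < (m.length : Int) ∧
        0 ≤ s1 + k * d1 ∧ s1 + k * d1 < ((m.headD "").length : Int)) ↔ k ≤ kmax))
    (hd : ¬(d0 = 0 ∧ d1 = 0))
    (hpre : ∀ u : Nat, u < N → pvCell m (s0 + (u : Int) * d0) (s1 + (u : Int) * d1) ≠ '#')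
    (hhit : if hitb then (N : Int) ≤ kmax ∧ pvCell m (s0 + (N : Int) * d0) (s1 + (N : Int) * d1) = '#'
            else (N : Int) = kmax + 1) :
    ∀ (t fuel : Nat), t ≤ N → N - t < fuel →
    pvGoA (pvM m s0 s1 d0 d1 t) direction d0 d1 (s0 + (t : Int) * d0) (s1 + (t : Int) * d1) fuel =
      if hitb then ([s0 + ((N : Int) - 1) * d0, s1 + ((N : Int) - 1) * d1], [d1, -d0], true, pvM m s0 s1 d0 d1 N)
      else ([s0 + (N : Int) * d0, s1 + (N : Int) * d1], direction, false, pvM m s0 s1 d0 d1 N) := by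
  have hNk : (N : Int) ≤ kmax + 1 := by
    cases hitb <;> simp at hhit
    · omega
    · omega
  have hinb : ∀ u : Nat, (u : Int) ≤ kmax → (0 ≤ s0 + (u : Int) * d0 ∧ s0 + (u : Int) * d0 < (m.length : Int) ∧
      0 ≤ s1 + (u : Int) * d1 ∧ s1 + (u : Int) * d1 < ((m.headD "").length : Int)) :=
    fun u hu => (hkiff u (by omega)).mpr hu
  have hnovisit : ∀ (t u : Nat), u < t → ¬(s0 + (u : Int) * d0 = s0 + (t : Int) * d0 ∧ s1 + (u : Int) * d1 = s1 + (t : Int) * d1) := by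
    rintro t u hu ⟨h1, h2⟩
    rcases (by tauto : d0 ≠ 0 ∨ d1 ≠ 0) with h | h
    · have : ((u : Int) - t) * d0 = 0 := by ring_nf; linarith
      rcases mul_eq_zero.mp this with h' | h' <;> omega
    · have : ((u : Int) - t) * d1 = 0 := by ring_nf; linarith
      rcases mul_eq_zero.mp this with h' | h' <;> omega
  intro t fuel
  induction fuel generalizing t with
  | zero => intro _ h; omega
  | succ fuel ih =>
    intro htN hfuel
    have hin : ∀ u : Nat, u < t → _ := fun u hu => hinb u (by omega)
    obtain ⟨hlen, hrlen, hcell⟩ := pvM_spec m s0 s1 d0 d1 t hrow hin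
    have hW : (((pvM m s0 s1 d0 d1 t).headD "").length : Int) = ((m.headD "").length : Int) := by
      have h0 := hrlen 0
      have e1 : (pvM m s0 s1 d0 d1 t).headD "" = (pvM m s0 s1 d0 d1 t).getD 0 "" := by
        cases hm : pvM m s0 s1 d0 d1 t <;> rfl
      have e2 : m.headD "" = m.getD 0 "" := by cases m <;> rfl
      have e3 : ∀ s : String, s.toList.length = s.length := fun s => by simp
      rw [e1, e2]
      rw [← e3, ← e3, h0]
    rcases Nat.eq_or_lt_of_le htN with hteq | htlt
    · -- t = N : the stopping step
      subst hteq
      cases hitb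
      · -- escape: position out of bounds
        simp only [if_neg, Bool.false_eq_true, if_false] at hhit ⊢
        have hnotin : ¬((t : Int) ≤ kmax) := by omega
        rw [pvGoA, if_neg ?_]
        · rw [hW, hlen]
          intro hc
          exact hnotin ((hkiff t (by omega)).mp (by tauto))
      · -- wall hit
        simp only [if_pos] at hhit ⊢
        obtain ⟨htk, hwall⟩ := hhit
        have hib := hinb t htk
        rw [pvGoA, if_pos (by rw [hW, hlen]; tauto)]
        have hnv : ¬ (∃ u, u < t ∧ (s0 + (u : Int) * d0 = s0 + (t : Int) * d0 ∧ s1 + (u : Int) * d1 = s1 + (t : Int) * d1)) := by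
          rintro ⟨u, hu, h⟩; exact hnovisit t u hu h
        rw [hcell _ _ (by omega) (by omega), if_neg hnv, if_pos hwall]
        have e0 : s0 + (t : Int) * d0 - d0 = s0 + ((t : Int) - 1) * d0 := by ring
        have e1 : s1 + (t : Int) * d1 - d1 = s1 + ((t : Int) - 1) * d1 := by ring
        rw [e0, e1]
    · -- t < N : walk one step
      have htk : (t : Int) ≤ kmax := by
        cases hitb <;> simp at hhit <;> omega
      have hib := hinb t htk
      rw [pvGoA, if_pos (by rw [hW, hlen]; tauto)]
      have hnv : ¬ (∃ u, u < t ∧ (s0 + (u : Int) * d0 = s0 + (t : Int) * d0 ∧ s1 + (u : Int) * d1 = s1 + (t : Int) * d1)) := by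
        rintro ⟨u, hu, h⟩; exact hnovisit t u hu h
      rw [hcell _ _ (by omega) (by omega), if_neg hnv, if_neg (hpre t htlt)]
      have hstep : pvUpd (pvM m s0 s1 d0 d1 t) (s0 + (t : Int) * d0) (s1 + (t : Int) * d1) = pvM m s0 s1 d0 d1 (t + 1) :=
        (pvM_succ m s0 s1 d0 d1 t).symm
      rw [hstep]
      have e0 : s0 + (t : Int) * d0 + d0 = s0 + ((t + 1 : Nat) : Int) * d0 := by push_cast; ring
      have e1 : s1 + (t : Int) * d1 + d1 = s1 + ((t + 1 : Nat) : Int) * d1 := by push_cast; ring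
      rw [e0, e1]
      exact ih (t + 1) (by omega) (by omega)

theorem pv_le_floordiv {k a d : Int} (hd : 0 < d) : k ≤ PySem.Int.floordiv a d ↔ k * d ≤ a := by
  have h := (PySem.Int.floordiv_eq_iff_of_pos (a := a) (q := PySem.Int.floordiv a d) hd).mp rfl
  constructor
  · intro hk; nlinarith [h.1]
  · intro hk; by_contra hc
    have : PySem.Int.floordiv a d + 1 ≤ k := by omega
    nlinarith [h.2]

theorem pv_axis_pos {p n d k : Int} (hd : 0 < d) (hp : 0 ≤ p) (hpn : p < n) (hk : 0 ≤ k) :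
    (0 ≤ p + k * d ∧ p + k * d < n) ↔ k ≤ PySem.Int.floordiv (n - 1 - p) d := by
  rw [pv_le_floordiv hd]
  have h1 : 0 ≤ k * d := mul_nonneg hk (le_of_lt hd)
  constructor <;> intro h <;> omega

theorem pv_axis_neg {p n d k : Int} (hd : d < 0) (hp : 0 ≤ p) (hpn : p < n) (hk : 0 ≤ k) :
    (0 ≤ p + k * d ∧ p + k * d < n) ↔ k ≤ PySem.Int.floordiv p (-d) := by
  rw [pv_le_floordiv (by omega)]
  have h1 : k * d ≤ 0 := mul_nonpos_of_nonneg_of_nonpos hk (le_of_lt hd)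
  have h2 : k * -d = -(k * d) := by ring
  rw [h2]
  constructor <;> intro h <;> omega


theorem pvKmax_spec (H W s0 s1 d0 d1 : Int)
    (hin : 0 ≤ s0 ∧ s0 < H ∧ 0 ≤ s1 ∧ s1 < W) (hd : ¬(d0 = 0 ∧ d1 = 0)) :
    ∀ k : Int, 0 ≤ k →
      ((0 ≤ s0 + k * d0 ∧ s0 + k * d0 < H ∧ 0 ≤ s1 + k * d1 ∧ s1 + k * d1 < W) ↔
        k ≤ pvKmax H W s0 s1 d0 d1) := by
  intro k hk
  obtain ⟨h1, h2, h3, h4⟩ := hin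
  have hshuffle : (0 ≤ s0 + k * d0 ∧ s0 + k * d0 < H ∧ 0 ≤ s1 + k * d1 ∧ s1 + k * d1 < W) ↔
      ((0 ≤ s0 + k * d0 ∧ s0 + k * d0 < H) ∧ (0 ≤ s1 + k * d1 ∧ s1 + k * d1 < W)) := by tauto
  rw [hshuffle]
  rcases lt_trichotomy d0 0 with hd0 | hd0 | hd0 <;> rcases lt_trichotomy d1 0 with hd1 | hd1 | hd1
  · rw [pvKmax, if_neg hd]
    simp only [if_pos hd0, if_pos hd1, if_neg (by omega : ¬ d0 > 0), if_neg (by omega : ¬ d1 > 0),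
      List.nil_append, List.cons_append, PySem.List.min?_id_cons, List.foldl, Option.getD_some]
    rw [pv_axis_neg hd0 h1 h2 hk, pv_axis_neg hd1 h3 h4 hk, le_min_iff]
  · subst hd1
    rw [pvKmax, if_neg hd]
    simp only [if_pos hd0, if_neg (by omega : ¬ d0 > 0), if_neg (by omega : ¬ (0:Int) > 0), if_neg (by omega : ¬ (0:Int) < 0),
      List.nil_append, List.append_nil, PySem.List.min?_id_cons, List.foldl, Option.getD_some]
    rw [pv_axis_neg hd0 h1 h2 hk]
    simp only [mul_zero, add_zero]
    constructor
    · tauto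
    · intro h; exact ⟨h, by omega⟩
  · rw [pvKmax, if_neg hd]
    simp only [if_pos hd0, if_pos hd1, if_neg (by omega : ¬ d0 > 0), if_neg (by omega : ¬ d1 < 0),
      List.nil_append, List.append_nil, List.cons_append, PySem.List.min?_id_cons, List.foldl, Option.getD_some]
    rw [pv_axis_neg hd0 h1 h2 hk, pv_axis_pos hd1 h3 h4 hk, le_min_iff]
  · subst hd0
    rw [pvKmax, if_neg hd]
    simp only [if_pos hd1, if_neg (by omega : ¬ (0:Int) > 0), if_neg (by omega : ¬ (0:Int) < 0), if_neg (by omega : ¬ d1 > 0),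
      List.nil_append, List.append_nil, PySem.List.min?_id_cons, List.foldl, Option.getD_some]
    rw [pv_axis_neg hd1 h3 h4 hk]
    simp only [mul_zero, add_zero]
    constructor
    · tauto
    · intro h; exact ⟨by omega, h⟩
  · exact absurd ⟨hd0, hd1⟩ hd
  · subst hd0
    rw [pvKmax, if_neg hd]
    simp only [if_pos hd1, if_neg (by omega : ¬ (0:Int) > 0), if_neg (by omega : ¬ (0:Int) < 0), if_neg (by omega : ¬ d1 < 0),
      List.nil_append, List.append_nil, PySem.List.min?_id_cons, List.foldl, Option.getD_some]
    rw [pv_axis_pos hd1 h3 h4 hk]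
    simp only [mul_zero, add_zero]
    constructor
    · tauto
    · intro h; exact ⟨by omega, h⟩
  · rw [pvKmax, if_neg hd]
    simp only [if_pos hd0, if_pos hd1, if_neg (by omega : ¬ d0 < 0), if_neg (by omega : ¬ d1 > 0),
      List.nil_append, List.append_nil, List.cons_append, PySem.List.min?_id_cons, List.foldl, Option.getD_some]
    rw [pv_axis_pos hd0 h1 h2 hk, pv_axis_neg hd1 h3 h4 hk, le_min_iff]
  · subst hd1
    rw [pvKmax, if_neg hd]
    simp only [if_pos hd0, if_neg (by omega : ¬ d0 < 0), if_neg (by omega : ¬ (0:Int) > 0), if_neg (by omega : ¬ (0:Int) < 0),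
      List.nil_append, List.append_nil, PySem.List.min?_id_cons, List.foldl, Option.getD_some]
    rw [pv_axis_pos hd0 h1 h2 hk]
    simp only [mul_zero, add_zero]
    constructor
    · tauto
    · intro h; exact ⟨h, by omega⟩
  · rw [pvKmax, if_neg hd]
    simp only [if_pos hd0, if_pos hd1, if_neg (by omega : ¬ d0 < 0), if_neg (by omega : ¬ d1 < 0),
      List.nil_append, List.append_nil, List.cons_append, PySem.List.min?_id_cons, List.foldl, Option.getD_some]
    rw [pv_axis_pos hd0 h1 h2 hk, pv_axis_pos hd1 h3 h4 hk, le_min_iff]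

theorem pv_find?_pyRange_some {p : Int → Bool} : ∀ {a b h : Int},
    (PySem.List.pyRange a b 1).find? p = some h →
    a ≤ h ∧ h < b ∧ p h = true ∧ ∀ k, a ≤ k → k < h → p k = false := by
  intro a b
  generalize hlen : (b - a).toNat = len
  induction len generalizing a with
  | zero =>
    intro h hf
    rw [PySem.List.pyRange_one_eq_nil (by omega)] at hf
    simp at hf
  | succ len ih =>
    intro h hf
    rw [PySem.List.pyRange_one_cons (by omega)] at hf
    by_cases hpa : p a
    · rw [List.find?_cons_of_pos hpa] at hf
      obtain rfl : a = h := by simpa using hf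
      exact ⟨le_refl _, by omega, hpa, fun k hk1 hk2 => by omega⟩
    · rw [List.find?_cons_of_neg hpa] at hf
      obtain ⟨h1, h2, h3, h4⟩ := ih (a := a + 1) (by omega) hf
      refine ⟨by omega, h2, h3, fun k hk1 hk2 => ?_⟩
      rcases eq_or_lt_of_le hk1 with rfl | hlt
      · simpa using hpa
      · exact h4 k (by omega) hk2

def pvCharMarks (cs : List Char) (cols : List Int) : List Char :=
  cols.foldl (fun r j => pvMark r j) cs

theorem pvCharMarks_append (cs : List Char) (cols : List Int) (j : Int) :
    pvCharMarks cs (cols ++ [j]) = pvMark (pvCharMarks cs cols) j := by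
  simp [pvCharMarks]

theorem pvCharMarks_len (cs : List Char) (cols : List Int)
    (hcols : ∀ j ∈ cols, 0 ≤ j ∧ j < (cs.length : Int)) :
    (pvCharMarks cs cols).length = cs.length := by
  induction cols generalizing cs with
  | nil => rfl
  | cons j cols ih =>
    have hj := hcols j (by simp)
    have : pvCharMarks cs (j :: cols) = pvCharMarks (cs.set j.toNat 'X') cols := by
      simp [pvCharMarks, pvMark_set hj.1 hj.2]
    rw [this, ih _ (fun j' hj' => by simpa using hcols j' (by simp [hj']))]
    simp

theorem pvCharMarks_getElem (cs : List Char) (cols : List Int)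
    (hcols : ∀ j ∈ cols, 0 ≤ j ∧ j < (cs.length : Int)) (idx : Nat) (hidx : idx < cs.length) :
    (pvCharMarks cs cols)[idx]? = some (if (idx : Int) ∈ cols then 'X' else cs[idx]) := by
  induction cols generalizing cs with
  | nil => simp [pvCharMarks, List.getElem?_eq_getElem hidx]
  | cons j cols ih =>
    have hj := hcols j (by simp)
    have hstep : pvCharMarks cs (j :: cols) = pvCharMarks (cs.set j.toNat 'X') cols := by
      simp [pvCharMarks, pvMark_set hj.1 hj.2]
    have hcols' : ∀ j' ∈ cols, 0 ≤ j' ∧ j' < ((cs.set j.toNat 'X').length : Int) :=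
      fun j' hj' => by simpa using hcols j' (by simp [hj'])
    have hidx' : idx < (cs.set j.toNat 'X').length := by simpa using hidx
    rw [hstep, ih (cs.set j.toNat 'X') hcols' hidx']
    by_cases hmem : (idx : Int) ∈ cols
    · rw [if_pos hmem, if_pos (by simp [hmem])]
    · rw [if_neg hmem, List.getElem_set]
      by_cases hje : j.toNat = idx
      · have hjj : j = (idx : Int) := by omega
        rw [if_pos hje, if_pos (by simp [hjj])]
      · rw [if_neg hje, if_neg ?_]
        intro hc
        rcases List.mem_cons.mp hc with hc | hc
        · exact hje (by omega)
        · exact hmem hc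

theorem pvBatch_vert (m : List String) (s0 s1 d0 d1 n : Int) (hn : 0 ≤ n) :
    (PySem.List.pyRange 0 n 1).foldl (fun mm k => pvUpd mm (s0 + k * d0) (s1 + k * d1)) m =
      pvM m s0 s1 d0 d1 n.toNat := by
  rw [PySem.List.pyRange_one, List.foldl_map, pvM]
  have h1 : (n - 0).toNat = n.toNat := by omega
  rw [h1]
  simp only [zero_add]

theorem pv_pyGetD_pySetD_self {α : Type} (xs : List α) (i : Int) (v d : α)
    (h0 : 0 ≤ i) (h1 : i < (xs.length : Int)) :
    PySem.List.pyGetD (PySem.List.pySetD xs i v) i d = v := by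
  rw [PySem.List.pySetD_of_nonneg _ _ h0,
      PySem.List.pyGetD_eq_getElem _ _ h0 (by simpa using h1),
      List.getElem_set, if_pos rfl]

theorem pv_pySetD_pySetD {α : Type} (xs : List α) (i : Int) (v w : α) (h0 : 0 ≤ i) :
    PySem.List.pySetD (PySem.List.pySetD xs i v) i w = PySem.List.pySetD xs i w := by
  rw [PySem.List.pySetD_of_nonneg _ _ h0, PySem.List.pySetD_of_nonneg _ _ h0,
      PySem.List.pySetD_of_nonneg _ _ h0, List.set_set]

-- pvM with d0 = 0: one row accumulates all the marks
theorem pvM_horiz (m : List String) (s0 s1 d1 : Int) (t : Nat) (ht : 0 < t)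
    (hi : 0 ≤ s0 ∧ s0 < (m.length : Int)) :
    pvM m s0 s1 0 d1 t = PySem.List.pySetD m s0 (String.ofList
      (pvCharMarks ((m[s0.toNat]'(by omega)).toList) ((List.range t).map (fun (u : Nat) => s1 + (u : Int) * d1)))) := by
  induction t with
  | zero => omega
  | succ t ih =>
    rw [pvM_succ, show s0 + (t : Int) * 0 = s0 from by ring]
    rcases Nat.eq_zero_or_pos t with rfl | htpos
    · have h0 : pvM m s0 s1 0 d1 0 = m := rfl
      rw [h0, pvUpd, PySem.List.pyGetD_eq_getElem _ _ hi.1 hi.2]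
      simp [pvCharMarks, pvMark]
    · rw [ih htpos, pvUpd,
          pv_pyGetD_pySetD_self _ _ _ _ hi.1 hi.2,
          pv_pySetD_pySetD _ _ _ _ hi.1]
      congr 1
      rw [List.range_succ, List.map_append]
      simp only [List.map_cons, List.map_nil]
      rw [pvCharMarks_append]
      congr 1
      simp

theorem pvBatch_horiz (m : List String) (s0 s1 d1 n : Int) (hn : 0 < n)
    (hi : 0 ≤ s0 ∧ s0 < (m.length : Int))
    (hcols : ∀ k : Int, 0 ≤ k → k < n →
      0 ≤ s1 + k * d1 ∧ s1 + k * d1 < (((m[s0.toNat]'(by omega)).toList.length) : Int)) :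
    PySem.List.pySetD m s0 (String.ofList
      ((PySem.List.enumerate (PySem.List.pyGetD m s0 "").toList 0).map
        (fun p => if (PySem.Set.ofList ((PySem.List.pyRange 0 n 1).map (fun k => s1 + k * d1))).contains p.1 then 'X' else p.2))) =
      pvM m s0 s1 0 d1 n.toNat := by
  rw [pvM_horiz _ _ _ _ _ (by omega) hi, PySem.List.pyGetD_eq_getElem _ _ hi.1 hi.2]
  have hcolseq : (PySem.List.pyRange 0 n 1).map (fun k => s1 + k * d1) =
      (List.range n.toNat).map (fun (u : Nat) => s1 + (u : Int) * d1) := by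
    rw [PySem.List.pyRange_one, List.map_map]
    have h1 : (n - 0).toNat = n.toNat := by omega
    rw [h1]
    apply List.map_congr_left
    intro u _
    simp
  rw [hcolseq]
  congr 1
  set cs := (m[s0.toNat]'(by omega)).toList with hcs
  set cols := (List.range n.toNat).map (fun (u : Nat) => s1 + (u : Int) * d1) with hcolsdef
  have hcb : ∀ j ∈ cols, 0 ≤ j ∧ j < (cs.length : Int) := by
    intro j hj
    rw [hcolsdef] at hj
    obtain ⟨u, hu, rfl⟩ := List.mem_map.mp hj
    exact hcols u (by omega) (by simp at hu; omega)
  apply congrArg String.ofList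
  apply List.ext_getElem?
  intro idx
  by_cases hidx : idx < cs.length
  · rw [List.getElem?_map, PySem.List.getElem?_enumerate,
        List.getElem?_eq_getElem hidx, pvCharMarks_getElem cs cols hcb idx hidx]
    simp only [Option.map_some]
    congr 1
    apply if_congr ?_ rfl rfl
    rw [zero_add, PySem.Set.contains_iff, PySem.Set.mem_ofList]
  · rw [List.getElem?_eq_none (by simpa using (by omega : cs.length ≤ idx)),
        List.getElem?_eq_none (by rw [pvCharMarks_len cs cols hcb]; omega)]

theorem pv_axis_lt {p n d kmax : Int} (hk0 : 0 ≤ kmax) (hd : d ≠ 0)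
    (h1 : 0 ≤ p + kmax * d) (h2 : p + kmax * d < n) (hp : 0 ≤ p) (hpn : p < n) : kmax < n := by
  rcases lt_or_gt_of_ne hd with hneg | hpos
  · have e : kmax * -d = -(kmax * d) := by ring
    have h3 := le_mul_of_one_le_right hk0 (by omega : 1 ≤ -d)
    rw [e] at h3
    omega
  · have h3 := le_mul_of_one_le_right hk0 (by omega : 1 ≤ d)
    omega
theorem main_equal (m : List String) (start direction : List Int)
    (hl1 : 2 ≤ start.length) (hl2 : 2 ≤ direction.length)
    (hemp : m = [] → 0 ≤ start.getD 0 0)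
    (hmain : (0 ≤ start.getD 0 0 ∧ start.getD 0 0 < (m.length : Int) ∧
      0 ≤ start.getD 1 0 ∧ start.getD 1 0 < ((m.headD "").length : Int)) →
      ((∀ r ∈ m, (m.headD "").length ≤ r.length) ∧
       ¬(direction.getD 0 0 = 0 ∧ direction.getD 1 0 = 0 ∧
         pvCell m (start.getD 0 0) (start.getD 1 0) ≠ '#'))) :
    traverse_direction m start direction = traverse_direction_alt m start direction := by
  have hg0 : ∀ (xs : List Int), PySem.List.pyGetD xs (0 : Int) 0 = xs.getD 0 0 := by
    intro xs
    rw [show (0 : Int) = ((0 : Nat) : Int) from rfl, PySem.List.pyGetD_natCast]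
  have hg1 : ∀ (xs : List Int), PySem.List.pyGetD xs (1 : Int) 0 = xs.getD 1 0 := by
    intro xs
    rw [show (1 : Int) = ((1 : Nat) : Int) from rfl, PySem.List.pyGetD_natCast]
  set s0 := start.getD 0 0 with hs0
  set s1 := start.getD 1 0 with hs1
  set d0 := direction.getD 0 0 with hd0
  set d1 := direction.getD 1 0 with hd1
  set H : Int := (m.length : Int) with hH
  set W : Int := ((m.headD "").length : Int) with hW
  rw [traverse_direction, traverse_direction_alt]
  simp only [hg0, hg1, ← hs0, ← hs1, ← hd0, ← hd1, ← hH, ← hW]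
  by_cases hinb : 0 ≤ s0 ∧ s0 < H ∧ 0 ≤ s1 ∧ s1 < W
  case neg =>
    rw [if_pos hinb]
    rw [show m.length + (m.headD "").length + 1 = (m.length + (m.headD "").length) + 1 from rfl,
        pvGoA, if_neg (by tauto)]
  case pos =>
    rw [if_neg (by tauto)]
    obtain ⟨hrow, hnz⟩ := hmain hinb
    by_cases hdz : d0 = 0 ∧ d1 = 0
    · -- zero direction: Pre_ forces a '#' at the start cell
      have hwall : pvCell m s0 s1 = '#' := by tauto
      obtain ⟨hz0, hz1⟩ := hdz
      rw [show m.length + (m.headD "").length + 1 = (m.length + (m.headD "").length) + 1 from rfl,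
          pvGoA, if_pos (by tauto)]
      rw [hz0, hz1]
      have hkz : pvKmax H W s0 s1 0 0 = 0 := by rw [pvKmax, if_pos ⟨rfl, rfl⟩]
      rw [hkz]
      have hrange : PySem.List.pyRange 0 (0 + 1) 1 = [0] := by
        rw [PySem.List.pyRange_one_cons (by omega), PySem.List.pyRange_one_eq_nil (by omega)]
      rw [hrange]
      have hfind0 : List.find? (fun k => decide (pvCell m (s0 + k * 0) (s1 + k * 0) = '#')) [0] = some 0 := by
        simp [hwall]
      rw [hfind0, hwall, if_pos rfl]
      norm_num
    · -- nonzero direction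
      have hkiff := pvKmax_spec H W s0 s1 d0 d1 hinb hdz
      set kmax := pvKmax H W s0 s1 d0 d1 with hkm
      have hk0 : 0 ≤ kmax := (hkiff 0 le_rfl).mp (by simpa using hinb)
      have hkle : kmax < H + W := by
        have hin2 := (hkiff kmax hk0).mpr le_rfl
        rcases (by tauto : d0 ≠ 0 ∨ d1 ≠ 0) with h | h
        · have := pv_axis_lt hk0 h hin2.1 hin2.2.1 hinb.1 hinb.2.1
          omega
        · have := pv_axis_lt hk0 h hin2.2.2.1 hin2.2.2.2 hinb.2.2.1 hinb.2.2.2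
          omega
      have hWrow : ∀ (k : Int), 0 ≤ k → k ≤ kmax →
          0 ≤ s1 + k * d1 ∧ s1 + k * d1 < (((m[s0.toNat]'(by omega)).toList.length) : Int) := by
        intro k hknn hkk
        have hin2 := (hkiff k hknn).mpr hkk
        have hmem : m[s0.toNat]'(by omega) ∈ m := List.getElem_mem _
        have hle := hrow _ hmem
        have he : (m[s0.toNat]'(by omega)).toList.length = (m[s0.toNat]'(by omega)).length := by simp
        refine ⟨hin2.2.2.1, ?_⟩
        have := hin2.2.2.2
        omega
      have hkiff' : ∀ k : Int, 0 ≤ k → ((0 ≤ s0 + k * d0 ∧ s0 + k * d0 < (m.length : Int) ∧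
          0 ≤ s1 + k * d1 ∧ s1 + k * d1 < ((m.headD "").length : Int)) ↔ k ≤ kmax) := by
        intro k hk
        rw [← hH, ← hW]
        exact hkiff k hk
      cases hfind : (PySem.List.pyRange 0 (kmax + 1) 1).find?
          (fun k => decide (pvCell m (s0 + k * d0) (s1 + k * d1) = '#')) with
      | some h =>
        obtain ⟨hh0, hhk, hhp, hhpre⟩ := pv_find?_pyRange_some hfind
        have hwall : pvCell m (s0 + h * d0) (s1 + h * d1) = '#' := of_decide_eq_true hhp
        set N : Nat := h.toNat with hN
        have hNh : (N : Int) = h := by omega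
        have hrun := pvRun m direction s0 s1 d0 d1 kmax N true hrow hkiff' hdz
          (by
            intro u hu
            have hdec := hhpre u (by omega) (by omega)
            intro hc
            rw [hc] at hdec
            simp at hdec)
          (by simp only [if_pos]; exact ⟨by omega, by rw [hNh]; exact hwall⟩)
          0 (m.length + (m.headD "").length + 1) (by omega) (by omega)
        have hstart : pvM m s0 s1 d0 d1 0 = m := rfl
        simp only [Nat.cast_zero, zero_mul, add_zero, hstart, if_pos] at hrun
        rw [hrun, hNh]
        have hm' : (if (0:Int) < h then
            (if d0 = 0 then
              PySem.List.pySetD m s0 (String.ofList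
                ((PySem.List.enumerate (PySem.List.pyGetD m s0 "").toList 0).map
                  (fun p => if (PySem.Set.ofList ((PySem.List.pyRange 0 h 1).map (fun k => s1 + k * d1))).contains p.1 then 'X' else p.2)))
            else (PySem.List.pyRange 0 h 1).foldl (fun mm k => pvUpd mm (s0 + k * d0) (s1 + k * d1)) m)
          else m) = pvM m s0 s1 d0 d1 N := by
          by_cases hpos : (0:Int) < h
          · rw [if_pos hpos]
            by_cases hz : d0 = 0
            · rw [if_pos hz, hz]
              exact pvBatch_horiz m s0 s1 d1 h hpos ⟨hinb.1, hinb.2.1⟩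
                (fun k hk1 hk2 => hWrow k hk1 (by omega))
            · rw [if_neg hz]
              exact pvBatch_vert m s0 s1 d0 d1 h (by omega)
          · rw [if_neg hpos]
            rw [show N = 0 from by omega]
            rfl
        exact congrArg (fun z => (([s0 + (h - 1) * d0, s1 + (h - 1) * d1] : List Int),
          ([d1, -d0] : List Int), true, z)) hm'.symm
      | none =>
        have hnone := List.find?_eq_none.mp hfind
        set N : Nat := (kmax + 1).toNat with hN
        have hNe : (N : Int) = kmax + 1 := by omega
        have hrun := pvRun m direction s0 s1 d0 d1 kmax N false hrow hkiff' hdz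
          (by
            intro u hu
            have hmem : (u : Int) ∈ PySem.List.pyRange 0 (kmax + 1) 1 :=
              PySem.List.mem_pyRange_one.mpr ⟨by omega, by omega⟩
            have hdec := hnone _ hmem
            intro hc
            rw [hc] at hdec
            simp at hdec)
          (by simp only [Bool.false_eq_true, if_false]; exact hNe)
          0 (m.length + (m.headD "").length + 1) (by omega) (by omega)
        have hstart : pvM m s0 s1 d0 d1 0 = m := rfl
        simp only [Nat.cast_zero, zero_mul, add_zero, hstart, Bool.false_eq_true, if_false] at hrun
        rw [hrun, hNe]
        have hm' : (if (0:Int) < kmax + 1 then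
            (if d0 = 0 then
              PySem.List.pySetD m s0 (String.ofList
                ((PySem.List.enumerate (PySem.List.pyGetD m s0 "").toList 0).map
                  (fun p => if (PySem.Set.ofList ((PySem.List.pyRange 0 (kmax + 1) 1).map (fun k => s1 + k * d1))).contains p.1 then 'X' else p.2)))
            else (PySem.List.pyRange 0 (kmax + 1) 1).foldl (fun mm k => pvUpd mm (s0 + k * d0) (s1 + k * d1)) m)
          else m) = pvM m s0 s1 d0 d1 N := by
          rw [if_pos (by omega)]
          by_cases hz : d0 = 0
          · rw [if_pos hz, hz]
            exact pvBatch_horiz m s0 s1 d1 (kmax + 1) (by omega) ⟨hinb.1, hinb.2.1⟩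
              (fun k hk1 hk2 => hWrow k hk1 (by omega))
          · rw [if_neg hz]
            exact pvBatch_vert m s0 s1 d0 d1 (kmax + 1) (by omega)
        exact congrArg (fun z => (([s0 + (kmax + 1) * d0, s1 + (kmax + 1) * d1] : List Int),
          direction, false, z)) hm'.symm

-- ===== VERDICT (by name: the statement is the Claim_ definition above) =====
theorem traverse_direction_spec : Claim_equal_traverse_direction := by
  intro m start direction _ hpre
  exact main_equal m start direction hpre.1 hpre.2.1 hpre.2.2.1 hpre.2.2.2
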